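-- pv_equiv track=rewrite | github.com/shrish842/Angel-My-MindAi | src/assistant.py | route_to_expert_cli
-- ===== SOURCE A (Python) =====
-- def route_to_expert_cli(user_query: str):
--     # Uses the same logic as app.py's router for consistency
--     query_lower = user_query.lower()
--     if any(keyword in query_lower for keyword in ["academic", "study", "studies", "exam", "marks", "remedial", "os subject", "subject"]):
--         return "academic_advisor_expert"
--     elif any(keyword in query_lower for keyword in ["girlfriend", "relationship", "conflict with", "argument with"]):
--         return "relationship_counselor_expert"
--     elif any(keyword in query_lower for keyword in ["feel", "feeling", "emotion", "sad", "happy", "anxious", "stressed", "joyful", "disappointed"]):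
--         return "emotion_reflection_expert"
--     elif any(keyword in query_lower for keyword in ["problem", "solve", "issue", "task", "how to", "strategy", "difficult", "time management", "balance"]):
--         return "problem_solving_expert"
--     elif any(keyword in query_lower for keyword in ["trip", "travel", "friends", "flatmates", "waterpark", "cricket", "hobby", "sport"]):
--         return "leisure_activity_expert"
--     else:
--         return "general_assistant"
-- ===== SOURCE B (Python) =====
-- # Alphabetically sorted flat keyword table; each keyword carries the priority
-- # of its expert (0 = highest).  A full scan keeps the best (minimum) priority
-- # of any matched keyword; table order is irrelevant to the result.
-- _KEYWORDS = [
--     ("academic", 0), ("anxious", 2), ("argument with", 1), ("balance", 3),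
--     ("conflict with", 1), ("cricket", 4), ("difficult", 3), ("disappointed", 2),
--     ("emotion", 2), ("exam", 0), ("feel", 2), ("feeling", 2), ("flatmates", 4),
--     ("friends", 4), ("girlfriend", 1), ("happy", 2), ("hobby", 4), ("how to", 3),
--     ("issue", 3), ("joyful", 2), ("marks", 0), ("os subject", 0), ("problem", 3),
--     ("relationship", 1), ("remedial", 0), ("sad", 2), ("solve", 3), ("sport", 4),
--     ("strategy", 3), ("stressed", 2), ("studies", 0), ("study", 0),
--     ("subject", 0), ("task", 3), ("time management", 3), ("travel", 4),
--     ("trip", 4), ("waterpark", 4),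
-- ]
--
-- _EXPERTS = [
--     "academic_advisor_expert",
--     "relationship_counselor_expert",
--     "emotion_reflection_expert",
--     "problem_solving_expert",
--     "leisure_activity_expert",
--     "general_assistant",
-- ]
--
-- def route_to_expert_cli(user_query: str):
--     query_lower = user_query.lower()
--     best = 5
--     for kw, p in _KEYWORDS:
--         if kw in query_lower:
--             best = min(best, p)
--     return _EXPERTS[best]
-- ===== Notes on version B (the rewrite author's own statement) =====
-- stated objective: alternative
-- what changed: Replaces the prioritized if/elif cascade of per-category any() tests with a single full scan over one flat, alphabetically sorted (keyword, priority) table that keeps the minimum matched priority and indexes an expert list; the scan is order-independent and has no early return, which is proved equivalent because the minimum matched priority equals the first matching category of the cascade.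
import Mathlib
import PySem

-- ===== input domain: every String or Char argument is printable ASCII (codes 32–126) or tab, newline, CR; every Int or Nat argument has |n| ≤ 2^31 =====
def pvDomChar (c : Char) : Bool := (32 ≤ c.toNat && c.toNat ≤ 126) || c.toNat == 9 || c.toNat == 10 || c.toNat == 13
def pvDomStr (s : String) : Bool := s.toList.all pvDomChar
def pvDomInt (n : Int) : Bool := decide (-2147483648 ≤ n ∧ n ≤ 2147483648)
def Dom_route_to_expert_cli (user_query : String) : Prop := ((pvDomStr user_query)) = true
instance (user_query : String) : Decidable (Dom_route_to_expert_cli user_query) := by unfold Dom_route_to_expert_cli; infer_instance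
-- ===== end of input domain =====

-- B replaces A's prioritized if/elif cascade by an order-independent min-priority scan over a
-- single alphabetically sorted flat keyword table (alternative; same cost).


-- ===== PORT A =====
def route_to_expert_cli (user_query : String) : String :=
  let query_lower := PySem.Str.lower user_query
  if ["academic", "study", "studies", "exam", "marks", "remedial", "os subject", "subject"].any (fun keyword => PySem.Str.isIn keyword query_lower) then
    "academic_advisor_expert"
  else if ["girlfriend", "relationship", "conflict with", "argument with"].any (fun keyword => PySem.Str.isIn keyword query_lower) then
    "relationship_counselor_expert"
  else if ["feel", "feeling", "emotion", "sad", "happy", "anxious", "stressed", "joyful", "disappointed"].any (fun keyword => PySem.Str.isIn keyword query_lower) then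
    "emotion_reflection_expert"
  else if ["problem", "solve", "issue", "task", "how to", "strategy", "difficult", "time management", "balance"].any (fun keyword => PySem.Str.isIn keyword query_lower) then
    "problem_solving_expert"
  else if ["trip", "travel", "friends", "flatmates", "waterpark", "cricket", "hobby", "sport"].any (fun keyword => PySem.Str.isIn keyword query_lower) then
    "leisure_activity_expert"
  else
    "general_assistant"

-- ===== PORT B =====
-- B: alphabetically sorted flat (keyword, priority) table; one full scan keeps the minimum
-- priority of any matched keyword (no early exit, table order irrelevant), then indexes EXPERTS.
def pvKEYWORDS : List (String × Nat) :=
  [("academic", 0), ("anxious", 2), ("argument with", 1), ("balance", 3),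
   ("conflict with", 1), ("cricket", 4), ("difficult", 3), ("disappointed", 2),
   ("emotion", 2), ("exam", 0), ("feel", 2), ("feeling", 2), ("flatmates", 4),
   ("friends", 4), ("girlfriend", 1), ("happy", 2), ("hobby", 4), ("how to", 3),
   ("issue", 3), ("joyful", 2), ("marks", 0), ("os subject", 0), ("problem", 3),
   ("relationship", 1), ("remedial", 0), ("sad", 2), ("solve", 3), ("sport", 4),
   ("strategy", 3), ("stressed", 2), ("studies", 0), ("study", 0),
   ("subject", 0), ("task", 3), ("time management", 3), ("travel", 4),
   ("trip", 4), ("waterpark", 4)]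

def pvEXPERTS : List String :=
  ["academic_advisor_expert", "relationship_counselor_expert", "emotion_reflection_expert",
   "problem_solving_expert", "leisure_activity_expert", "general_assistant"]

-- the loop body: keep the best (minimum) priority of a matched keyword
def pvStep (query_lower : String) (best : Nat) (e : String × Nat) : Nat :=
  if PySem.Str.isIn e.1 query_lower then min best e.2 else best

def route_to_expert_cli_alt (user_query : String) : String :=
  let query_lower := PySem.Str.lower user_query
  let best := pvKEYWORDS.foldl (pvStep query_lower) 5
  -- _EXPERTS[best]: best ≤ 5 always (foldl only lowers 5), so the index never raises; exact
  (PySem.List.pyGet? pvEXPERTS (best : Int)).getD ""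

-- ===== PRECONDITION & SPEC =====
def Spec_route_to_expert_cli (user_query : String) (out : String) : Prop := out = route_to_expert_cli_alt user_query
instance (user_query : String) (out : String) : Decidable (Spec_route_to_expert_cli user_query out) := by unfold Spec_route_to_expert_cli; infer_instance

-- ===== CLAIM (what is proved, stated in full; the proofs are below) =====
def Claim_equal_route_to_expert_cli : Prop := ∀ (user_query : String), Dom_route_to_expert_cli user_query → Spec_route_to_expert_cli user_query (route_to_expert_cli user_query)

-- ===== LEMMAS AND PROOFS =====

-- the loop body is right-commutative, so the fold is invariant under permutation of the table
theorem pvStep_comm (ql : String) (a : Nat) (x y : String × Nat) :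
    pvStep ql (pvStep ql a x) y = pvStep ql (pvStep ql a y) x := by
  unfold pvStep; split_ifs <;> omega

theorem pvFold_perm (ql : String) {l₁ l₂ : List (String × Nat)} (h : l₁.Perm l₂) :
    ∀ acc, l₁.foldl (pvStep ql) acc = l₂.foldl (pvStep ql) acc := by
  induction h with
  | nil => intro _; rfl
  | cons x _ ih => intro acc; simp only [List.foldl_cons]; exact ih _
  | swap x y l => intro acc; simp only [List.foldl_cons]; rw [pvStep_comm]
  | trans _ _ ih1 ih2 => intro acc; rw [ih1, ih2]

-- folding one category's keywords (all priority p) is 'min acc p' iff any keyword matches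
theorem pvFold_seg (ql : String) (p : Nat) (kws : List String) :
    ∀ acc, (kws.map (fun k => (k, p))).foldl (pvStep ql) acc =
      if kws.any (fun k => PySem.Str.isIn k ql) then min acc p else acc := by
  induction kws with
  | nil => intro acc; simp
  | cons k rest ih =>
      intro acc
      simp only [List.map_cons, List.foldl_cons, List.any_cons, ih]
      unfold pvStep
      by_cases hk : PySem.Str.isIn k ql = true <;>
        by_cases hr : (rest.any fun k => PySem.Str.isIn k ql) = true <;>
          simp only [hk, hr, if_pos, if_neg, Bool.or_false, Bool.or_true,
            Bool.false_eq_true, not_false_eq_true] <;> omega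

-- the alphabetical table is a permutation of the five category segments in A's order
theorem pvPerm :
    pvKEYWORDS.Perm
      ((["academic", "study", "studies", "exam", "marks", "remedial", "os subject", "subject"].map (fun k => (k, (0 : Nat))))
        ++ (["girlfriend", "relationship", "conflict with", "argument with"].map (fun k => (k, 1)))
        ++ (["feel", "feeling", "emotion", "sad", "happy", "anxious", "stressed", "joyful", "disappointed"].map (fun k => (k, 2)))
        ++ (["problem", "solve", "issue", "task", "how to", "strategy", "difficult", "time management", "balance"].map (fun k => (k, 3)))
        ++ (["trip", "travel", "friends", "flatmates", "waterpark", "cricket", "hobby", "sport"].map (fun k => (k, 4)))) := by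
  decide

set_option maxHeartbeats 2000000 in
-- ===== VERDICT (by name: the statement is the Claim_ definition above) =====
theorem route_to_expert_cli_spec : Claim_equal_route_to_expert_cli := by
  intro user_query _
  simp only [Spec_route_to_expert_cli, route_to_expert_cli, route_to_expert_cli_alt]
  rw [pvFold_perm (PySem.Str.lower user_query) pvPerm]
  simp only [List.foldl_append, pvFold_seg]
  by_cases h0 : (["academic", "study", "studies", "exam", "marks", "remedial", "os subject", "subject"].any (fun k => PySem.Str.isIn k (PySem.Str.lower user_query))) = true <;>
  by_cases h1 : (["girlfriend", "relationship", "conflict with", "argument with"].any (fun k => PySem.Str.isIn k (PySem.Str.lower user_query))) = true <;>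
  by_cases h2 : (["feel", "feeling", "emotion", "sad", "happy", "anxious", "stressed", "joyful", "disappointed"].any (fun k => PySem.Str.isIn k (PySem.Str.lower user_query))) = true <;>
  by_cases h3 : (["problem", "solve", "issue", "task", "how to", "strategy", "difficult", "time management", "balance"].any (fun k => PySem.Str.isIn k (PySem.Str.lower user_query))) = true <;>
  by_cases h4 : (["trip", "travel", "friends", "flatmates", "waterpark", "cricket", "hobby", "sport"].any (fun k => PySem.Str.isIn k (PySem.Str.lower user_query))) = true <;>
  simp only [h0, h1, h2, h3, h4, if_true, if_false, Bool.false_eq_true] <;> rfl
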